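-- pv_equiv track=rewrite | github.com/Harshrj53/CF_ques_sol | Short_Sort_sol.py | can_abc
-- ===== SOURCE A (Python) =====
-- def can_abc(s):
--     if s[0]=="a" and s[1]=="b" and s[2]=="c":
--         return "YES"
--     s=list(s)
--     for i in range(3):
--         for j in range(i+1,3):
--             s[i],s[j]=s[j],s[i]
--             if s[0]=="a" and s[1]=="b" and s[2]=="c":
--                 return "YES"
--             s[i],s[j]=s[j],s[i]
--     return "NO"
-- ===== SOURCE B (Python) =====
-- def can_abc(s):
--     t = [s[0], s[1], s[2]]
--     if t == ['a', 'b', 'c']: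
--         return "YES"
--     is_perm = t.count('a') == 1 and t.count('b') == 1 and t.count('c') == 1
--     mismatches = sum(x != y for x, y in zip(t, 'abc'))
--     return "YES" if is_perm and mismatches == 2 else "NO"
-- ===== Notes on version B (the rewrite author's own statement) =====
-- stated objective: simpler
-- what changed: Replaces A's brute-force enumeration of every swap (i,j) with swap/check/swap-back bookkeeping by a direct classification of the first three characters: already the target word, or a permutation of it exactly one transposition away (multiset check plus mismatch count == 2).
import Mathlib
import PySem

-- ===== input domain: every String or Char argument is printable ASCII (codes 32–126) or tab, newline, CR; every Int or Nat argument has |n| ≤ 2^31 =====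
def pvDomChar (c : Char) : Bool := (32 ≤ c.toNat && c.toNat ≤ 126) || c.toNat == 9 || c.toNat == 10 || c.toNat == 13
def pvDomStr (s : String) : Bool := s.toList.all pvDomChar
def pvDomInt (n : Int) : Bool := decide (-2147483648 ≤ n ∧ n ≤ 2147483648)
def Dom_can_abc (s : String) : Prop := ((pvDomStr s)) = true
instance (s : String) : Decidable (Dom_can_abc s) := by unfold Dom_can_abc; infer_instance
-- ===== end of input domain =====

-- B replaces A's brute-force enumeration of all swaps by a direct permutation-distance
-- test (multiset check + mismatch count); objective: simpler.

-- ===== PORT A =====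
-- literal transliteration of A: check, then try every swap (i,j), 0 ≤ i < j < 3,
-- checking after the swap and swapping back. Early return carried as an Option.
-- Indices produced by pyRange are nonnegative, so PySem.List.pyGetD/PySem.List.pySetD are exact under Pre_.
def can_abc (s : String) : String :=
  let l := s.toList
  if PySem.List.pyGetD l 0 ' ' = 'a' ∧ PySem.List.pyGetD l 1 ' ' = 'b' ∧ PySem.List.pyGetD l 2 ' ' = 'c' then "YES"
  else
    let res :=
      (PySem.List.pyRange 0 3 1).foldl (fun st i =>
        (PySem.List.pyRange (i + 1) 3 1).foldl (fun st2 j =>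
          match st2 with
          | (l, some r) => (l, some r)
          | (l, none) =>
            -- s[i],s[j] = s[j],s[i]
            let l1 := PySem.List.pySetD (PySem.List.pySetD l i (PySem.List.pyGetD l j ' ')) j (PySem.List.pyGetD l i ' ')
            if PySem.List.pyGetD l1 0 ' ' = 'a' ∧ PySem.List.pyGetD l1 1 ' ' = 'b' ∧ PySem.List.pyGetD l1 2 ' ' = 'c' then
              (l1, some "YES")
            else
              -- swap back
              (PySem.List.pySetD (PySem.List.pySetD l1 i (PySem.List.pyGetD l1 j ' ')) j (PySem.List.pyGetD l1 i ' '), none)) st) (l, (none : Option String))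
    match res.2 with
    | some r => r
    | none => "NO"

-- ===== PORT B =====
def can_abc_alt (s : String) : String :=
  let l := s.toList
  let t := [PySem.List.pyGetD l 0 ' ', PySem.List.pyGetD l 1 ' ', PySem.List.pyGetD l 2 ' ']
  if t = ['a', 'b', 'c'] then "YES"
  else
    let isPerm := PySem.List.count t 'a' == 1 && PySem.List.count t 'b' == 1 && PySem.List.count t 'c' == 1
    let mismatches := ((t.zip "abc".toList).map (fun p => if p.1 ≠ p.2 then (1 : Int) else 0)).sum
    if isPerm && (mismatches == 2) then "YES" else "NO"

-- ===== PRECONDITION & SPEC =====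
-- Python A raises IndexError on strings shorter than 3 characters; Pre_ excludes exactly those.
def Pre_can_abc (s : String) : Prop := 3 ≤ s.toList.length
instance (s : String) : Decidable (Pre_can_abc s) := by unfold Pre_can_abc; infer_instance
def pvWitness_can_abc : String := "bac"
def Spec_can_abc (s : String) (out : String) : Prop := out = can_abc_alt s
instance (s : String) (out : String) : Decidable (Spec_can_abc s out) := by unfold Spec_can_abc; infer_instance

-- ===== CLAIM (what is proved, stated in full; the proofs are below) =====
def Claim_equal_can_abc : Prop := ∀ (s : String), Dom_can_abc s → Pre_can_abc s → Spec_can_abc s (can_abc s)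

-- ===== LEMMAS AND PROOFS =====

theorem char_cls (x : Char) : x = 'a' ∨ x = 'b' ∨ x = 'c' ∨ (x ≠ 'a' ∧ x ≠ 'b' ∧ x ≠ 'c') := by
  by_cases h1 : x = 'a' <;> by_cases h2 : x = 'b' <;> by_cases h3 : x = 'c' <;> tauto

set_option maxHeartbeats 2000000 in
theorem main_lemma (a b c : Char) (r : List Char) :
    can_abc (String.ofList (a :: b :: c :: r)) = can_abc_alt (String.ofList (a :: b :: c :: r)) := by
  rcases char_cls a with ha | ha | ha | ⟨ha1, ha2, ha3⟩ <;>
  rcases char_cls b with hb | hb | hb | ⟨hb1, hb2, hb3⟩ <;>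
  rcases char_cls c with hc | hc | hc | ⟨hc1, hc2, hc3⟩ <;>
  subst_vars <;>
  simp [can_abc, can_abc_alt, PySem.List.pyRange_one, List.range_succ,
        PySem.List.pyGetD_ofNat', PySem.List.pySetD_of_nonneg, PySem.List.count_eq, *]

-- ===== VERDICT (by name: the statement is the Claim_ definition above) =====
theorem can_abc_spec : Claim_equal_can_abc := by
  intro s _ hpre
  unfold Spec_can_abc
  match h : s.toList with
  | [] => rw [Pre_can_abc, h] at hpre; simp at hpre
  | [a] => rw [Pre_can_abc, h] at hpre; simp at hpre
  | [a, b] => rw [Pre_can_abc, h] at hpre; simp at hpre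
  | a :: b :: c :: r =>
    have hs : s = String.ofList (a :: b :: c :: r) := by
      rw [← h]; exact (String.ofList_toList ..).symm
    rw [hs, main_lemma]
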